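-- pv_equiv track=rewrite | github.com/KalMar1984/05-nedela-gala-projekts | logic.py | get_available_months
-- ===== SOURCE A (Python) =====
-- def get_available_months(expenses):
--     # Funkcija atrod visus mēnešus, kuros ir izdevumi
--
--     months = set()
--     # Izveido set (īpašs saraksta veids bez dublikātiem)
--
--     for e in expenses:
--         # Iet cauri visiem izdevumiem
--         date_str = str(e.get("date", "")).strip()
--         # Droša piekļuve datuma laukam, ja nav, izmanto tukšu stringu
--
--         if len(date_str) >= 7:
--             month = date_str[:7]
--             # Paņem tikai pirmās 7 rakstzīmes no datuma
--             # piemēram "2025-02-15" → "2025-02"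
--
--             months.add(month)
--             # Pievieno mēnesi set struktūrai
--
--     months_list = list(months)
--     # Pārvērš set par sarakstu
--
--     months_list.sort()
--     # Sakārto mēnešus augošā secībā
--
--     return months_list
-- ===== SOURCE B (Python) =====
-- def _insert_month(months, m):
--     # Insert m into the sorted duplicate-free list `months`, keeping it
--     # sorted and duplicate-free; unchanged if m is already present.
--     lo = 0
--     while lo < len(months) and months[lo] < m:
--         lo += 1
--     if lo < len(months) and months[lo] == m:
--         return months
--     return months[:lo] + [m] + months[lo:]
--
--
-- def get_available_months(expenses):
--     # Maintain the answer directly as a sorted duplicate-free list by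
--     # ordered insertion -- no set and no final sort.
--     result = []
--     for e in expenses:
--         date_str = str(e.get("date", "")).strip()
--         if len(date_str) >= 7:
--             result = _insert_month(result, date_str[:7])
--     return result
-- ===== Notes on version B (the rewrite author's own statement) =====
-- stated objective: alternative
-- what changed: B builds no set and never calls sort: it maintains the answer itself as a sorted duplicate-free list, performing an ordered insertion (skip smaller elements, drop the month if already present) for each qualifying expense.
import Mathlib
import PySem

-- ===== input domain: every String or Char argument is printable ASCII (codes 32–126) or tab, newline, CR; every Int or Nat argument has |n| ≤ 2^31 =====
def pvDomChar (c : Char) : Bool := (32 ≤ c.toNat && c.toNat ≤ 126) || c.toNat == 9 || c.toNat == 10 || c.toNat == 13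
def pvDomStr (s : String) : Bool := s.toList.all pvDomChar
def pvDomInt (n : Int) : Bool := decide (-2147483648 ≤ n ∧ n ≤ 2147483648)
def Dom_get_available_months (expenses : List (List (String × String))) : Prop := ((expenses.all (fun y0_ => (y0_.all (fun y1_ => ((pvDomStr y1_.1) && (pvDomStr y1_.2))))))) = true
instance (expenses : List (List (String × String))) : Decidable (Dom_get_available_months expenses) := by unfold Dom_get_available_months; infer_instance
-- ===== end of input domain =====

-- B replaces A's set-then-sort by ordered insertion into a sorted duplicate-free list (alternative structure, no speed claim).

-- ===== PORT A =====
def get_available_months (expenses : List (List (String × String))) : List String :=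
  let months : PySem.Set String := expenses.foldl (fun months e =>
    let date_str := PySem.Str.strip (PySem.Dict.getD (PySem.Dict.mk e) "date" "")
    if 7 ≤ PySem.Str.len date_str then
      PySem.Set.add months (PySem.Str.slice date_str none (some 7))
    else months) PySem.Set.empty
  PySem.List.sorted months (fun x => x) false

-- ===== PORT B =====
-- ordered insertion: skip elements below m, keep the list unchanged if m is
-- found, otherwise splice m in (Source B's while-loop scan as structural recursion)
def pvInsertMonth : List String → String → List String
  | [], m => [m]
  | h :: t, m =>
      if h < m then h :: pvInsertMonth t m
      else if h == m then h :: t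
      else m :: h :: t

def get_available_months_alt (expenses : List (List (String × String))) : List String :=
  expenses.foldl (fun result e =>
    let date_str := PySem.Str.strip (PySem.Dict.getD (PySem.Dict.mk e) "date" "")
    if 7 ≤ PySem.Str.len date_str then
      pvInsertMonth result (PySem.Str.slice date_str none (some 7))
    else result) []

-- ===== PRECONDITION & SPEC =====
def Spec_get_available_months (expenses : List (List (String × String))) (out : List String) : Prop := out = get_available_months_alt expenses
instance (expenses : List (List (String × String))) (out : List String) : Decidable (Spec_get_available_months expenses out) := by unfold Spec_get_available_months; infer_instance

-- ===== CLAIM (what is proved, stated in full; the proofs are below) =====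
def Claim_equal_get_available_months : Prop := ∀ (expenses : List (List (String × String))), Dom_get_available_months expenses → Spec_get_available_months expenses (get_available_months expenses)

-- ===== LEMMAS AND PROOFS =====

-- the month prefix of one expense record, and the filter condition (shared analysis of both loops)
def pvDate (e : List (String × String)) : String :=
  PySem.Str.strip (PySem.Dict.getD (PySem.Dict.mk e) "date" "")

def pvMonths (l : List (List (String × String))) : List String :=
  (l.filter (fun e => decide (7 ≤ PySem.Str.len (pvDate e)))).map
    (fun e => PySem.Str.slice (pvDate e) none (some 7))

lemma pvMonths_cons (e : List (String × String)) (l : List (List (String × String))) :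
    pvMonths (e :: l) =
      if 7 ≤ PySem.Str.len (pvDate e) then
        PySem.Str.slice (pvDate e) none (some 7) :: pvMonths l
      else pvMonths l := by
  unfold pvMonths
  rw [List.filter_cons]
  by_cases h : 7 ≤ PySem.Str.len (pvDate e)
  · rw [if_pos (decide_eq_true h), if_pos h, List.map_cons]
  · rw [if_neg (fun hc => h (of_decide_eq_true hc)), if_neg h]

lemma foldA_eq (l : List (List (String × String))) :
    ∀ s : PySem.Set String,
      l.foldl (fun months e =>
        let date_str := PySem.Str.strip (PySem.Dict.getD (PySem.Dict.mk e) "date" "")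
        if 7 ≤ PySem.Str.len date_str then
          PySem.Set.add months (PySem.Str.slice date_str none (some 7))
        else months) s = PySem.Set.update s (pvMonths l) := by
  induction l with
  | nil => intro s; simp [pvMonths, PySem.Set.update]
  | cons e l ih =>
    intro s
    simp only [List.foldl_cons]
    rw [pvMonths_cons]
    simp only [pvDate]
    split_ifs with h
    · rw [PySem.Set.update_cons, ih]
    · rw [ih]

lemma insert_spec (m : String) (acc : List String) (h : acc.Pairwise (· < ·)) :
    (pvInsertMonth acc m).Pairwise (· < ·) ∧
    (∀ y, y ∈ pvInsertMonth acc m ↔ y = m ∨ y ∈ acc) := by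
  induction acc with
  | nil => simp [pvInsertMonth]
  | cons a t ih =>
    have ht : t.Pairwise (· < ·) := h.of_cons
    have hat : ∀ y ∈ t, a < y := fun y hy => List.rel_of_pairwise_cons h hy
    by_cases hlt : a < m
    · have ⟨ip, im⟩ := ih ht
      refine ⟨?_, ?_⟩
      · simp only [pvInsertMonth, if_pos hlt]
        refine List.Pairwise.cons ?_ ip
        intro y hy
        rcases (im y).mp hy with rfl | hy
        · exact hlt
        · exact hat y hy
      · intro y
        simp only [pvInsertMonth, if_pos hlt, List.mem_cons, im]
        tauto
    · by_cases heq : a = m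
      · refine ⟨?_, ?_⟩
        · simpa [pvInsertMonth, hlt, heq] using h
        · intro y
          simp only [pvInsertMonth, if_neg hlt, if_pos (beq_iff_eq.mpr heq), List.mem_cons]
          subst heq; tauto
      · have hma : m < a := lt_of_le_of_ne (not_lt.mp hlt) (fun e => heq e.symm)
        have hrw : pvInsertMonth (a :: t) m = m :: a :: t := by
          simp [pvInsertMonth, hlt, heq]
        rw [hrw]
        refine ⟨?_, ?_⟩
        · refine List.Pairwise.cons ?_ h
          intro y hy
          rcases List.mem_cons.mp hy with rfl | hy
          · exact hma
          · exact lt_trans hma (hat y hy)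
        · intro y
          simp only [List.mem_cons]

lemma goB_spec (l : List (List (String × String))) :
    ∀ acc : List String, acc.Pairwise (· < ·) →
      (l.foldl (fun result e =>
        let date_str := PySem.Str.strip (PySem.Dict.getD (PySem.Dict.mk e) "date" "")
        if 7 ≤ PySem.Str.len date_str then
          pvInsertMonth result (PySem.Str.slice date_str none (some 7))
        else result) acc).Pairwise (· < ·) ∧
      (∀ y, y ∈ l.foldl (fun result e =>
        let date_str := PySem.Str.strip (PySem.Dict.getD (PySem.Dict.mk e) "date" "")
        if 7 ≤ PySem.Str.len date_str then
          pvInsertMonth result (PySem.Str.slice date_str none (some 7))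
        else result) acc ↔ y ∈ acc ∨ y ∈ pvMonths l) := by
  induction l with
  | nil =>
    intro acc h
    refine ⟨h, fun y => ?_⟩
    simp [pvMonths]
  | cons e rest ih =>
    intro acc h
    simp only [List.foldl_cons]
    rw [pvMonths_cons]
    simp only [pvDate]
    split_ifs with hc
    · have ⟨ip, im⟩ := insert_spec
        (PySem.Str.slice (PySem.Str.strip (PySem.Dict.getD (PySem.Dict.mk e) "date" "")) none (some 7)) acc h
      have ⟨gp, gm⟩ := ih _ ip
      refine ⟨gp, fun y => ?_⟩
      rw [gm y, im y, List.mem_cons]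
      constructor
      · rintro ((hy | hy) | hy)
        · exact Or.inr (Or.inl hy)
        · exact Or.inl hy
        · exact Or.inr (Or.inr hy)
      · rintro (hy | hy | hy)
        · exact Or.inl (Or.inr hy)
        · exact Or.inl (Or.inl hy)
        · exact Or.inr hy
    · have ⟨gp, gm⟩ := ih acc h
      refine ⟨gp, fun y => ?_⟩
      rw [gm y]

-- ===== VERDICT (by name: the statement is the Claim_ definition above) =====
theorem get_available_months_spec : Claim_equal_get_available_months := by
  intro expenses _
  unfold Spec_get_available_months get_available_months get_available_months_alt
  rw [foldA_eq]
  simp only [PySem.Set.update_empty]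
  have ⟨gp, gm⟩ := goB_spec expenses [] List.Pairwise.nil
  refine PySem.List.sorted_eq_of_perm_of_pairwise_lt _ _ _ ?_ (by simpa using gp)
  apply (List.perm_ext_iff_of_nodup (gp.imp ne_of_lt)
    (PySem.Set.nodup_ofList (pvMonths expenses))).mpr
  intro y
  rw [gm y, PySem.Set.mem_ofList]
  simp
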